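-- pv_equiv track=rewrite | github.com/yuntaoL/ColoredQRCode | coloredqrcode/utils.py | split_and_pad_data
-- ===== SOURCE A (Python) =====
-- from typing import Dict, Tuple, Union, List
--
-- def split_and_pad_data(data: str, n_parts: int, pad_char: str) -> List[str]:
--     """
--     Split data into n_parts, padding each part to the same length with pad_char.
--     """
--     n = len(data)
--     k, m = divmod(n, n_parts)
--     parts = [
--         data[i * k + min(i, m) : (i + 1) * k + min(i + 1, m)] for i in range(n_parts)
--     ]
--     maxlen = max(len(p) for p in parts)
--     return [p.ljust(maxlen, pad_char) for p in parts]
-- ===== SOURCE B (Python) =====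
-- def split_and_pad_data(data: str, n_parts: int, pad_char: str):
--     parts = []
--     rest = data
--     for r in range(n_parts, 0, -1):
--         size = -(-len(rest) // r)  # ceil division: next chunk of an even split
--         parts.append(rest[:size])
--         rest = rest[size:]
--     maxlen = max(len(p) for p in parts)
--     return [p.ljust(maxlen, pad_char) for p in parts]
-- ===== Notes on version B (the rewrite author's own statement) =====
-- stated objective: alternative
-- what changed: Replaces the closed-form slice-index comprehension (divmod plus i*k+min(i,m) arithmetic per part) with a greedy chop: repeatedly take ceil(len(rest)/parts_left) characters off the front of the remaining string; the max scan and ljust padding are kept.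
import Mathlib
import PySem

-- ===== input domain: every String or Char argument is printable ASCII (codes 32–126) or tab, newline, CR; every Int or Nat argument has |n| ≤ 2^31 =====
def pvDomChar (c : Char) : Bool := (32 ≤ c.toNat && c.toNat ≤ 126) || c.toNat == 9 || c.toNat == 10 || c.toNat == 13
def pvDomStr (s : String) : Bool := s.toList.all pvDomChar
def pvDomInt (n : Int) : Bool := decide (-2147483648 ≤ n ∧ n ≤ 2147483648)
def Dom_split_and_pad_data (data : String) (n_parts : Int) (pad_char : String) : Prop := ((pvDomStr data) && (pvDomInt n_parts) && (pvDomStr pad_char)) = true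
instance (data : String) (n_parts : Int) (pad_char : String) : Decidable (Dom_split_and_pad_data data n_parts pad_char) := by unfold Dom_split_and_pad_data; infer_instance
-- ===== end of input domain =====

-- B replaces A's closed-form divmod/slice-index comprehension by a greedy chop that repeatedly
-- takes ceil(len(rest)/parts_left) characters off the remaining string (alternative, same cost).


-- ===== PORT A =====
def split_and_pad_data (data : String) (n_parts : Int) (pad_char : String) : List String :=
  let n : Int := PySem.Str.len data
  match PySem.Int.divmod? n n_parts with
  | none => []          -- ZeroDivisionError (n_parts = 0): excluded by Pre_
  | some (k, m) =>
    let parts : List (List Char) :=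
      (PySem.List.pyRange 0 n_parts).foldl
        (fun acc i =>
          acc ++ [PySem.List.slice data.toList (some (i * k + min i m)) (some ((i + 1) * k + min (i + 1) m))]) []
    match PySem.List.max? (parts.map (fun p => (p.length : Int))) (fun x => x) with
    | none => []        -- ValueError: max() of empty sequence (n_parts < 0): excluded by Pre_
    | some maxlen =>
      match pad_char.toList with
      -- p.ljust(maxlen, c), hand-ported: exact for a one-character fill character
      | [c] => parts.map (fun p => String.ofList (p ++ List.replicate (maxlen.toNat - p.length) c))
      | _ => []         -- TypeError: fill character must be exactly one character: excluded by Pre_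

-- ===== PORT B =====
def split_and_pad_data_alt (data : String) (n_parts : Int) (pad_char : String) : List String :=
  let st :=
    (PySem.List.pyRange n_parts 0 (-1)).foldl
      (fun (st : List (List Char) × List Char) r =>
        let size : Int := -(PySem.Int.floordiv (-((st.2.length : Int))) r)   -- -(-len(rest) // r)
        (st.1 ++ [PySem.List.slice st.2 none (some size)], PySem.List.slice st.2 (some size) none))
      ([], data.toList)
  match PySem.List.max? (st.1.map (fun p => (p.length : Int))) (fun x => x) with
  | none => []        -- ValueError: max() of empty sequence (n_parts ≤ 0): excluded by Pre_
  | some maxlen =>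
    -- p.ljust(maxlen, pad_char), hand-ported: exact for a one-character fill character;
    -- any other fill length is a TypeError, excluded by Pre_
    if pad_char.toList.length = 1 then
      st.1.map (fun p => String.ofList (p ++ List.replicate (maxlen.toNat - p.length) (pad_char.toList.headD ' ')))
    else []

-- ===== PRECONDITION & SPEC =====
-- Pre_ excludes exactly the inputs where the Python A raises: n_parts = 0 (ZeroDivisionError),
-- n_parts < 0 (ValueError: max() of empty sequence), and a fill string of length ≠ 1 (TypeError from ljust).
def Pre_split_and_pad_data (data : String) (n_parts : Int) (pad_char : String) : Prop :=
  1 ≤ n_parts ∧ pad_char.toList.length = 1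
instance (data : String) (n_parts : Int) (pad_char : String) : Decidable (Pre_split_and_pad_data data n_parts pad_char) := by unfold Pre_split_and_pad_data; infer_instance

def pvWitness_split_and_pad_data : String × Int × String := ("abcde", 3, "x")

def Spec_split_and_pad_data (data : String) (n_parts : Int) (pad_char : String) (out : List String) : Prop := out = split_and_pad_data_alt data n_parts pad_char
instance (data : String) (n_parts : Int) (pad_char : String) (out : List String) : Decidable (Spec_split_and_pad_data data n_parts pad_char out) := by unfold Spec_split_and_pad_data; infer_instance

-- ===== CLAIM (what is proved, stated in full; the proofs are below) =====
def Claim_equal_split_and_pad_data : Prop := ∀ (data : String) (n_parts : Int) (pad_char : String), Dom_split_and_pad_data data n_parts pad_char → Pre_split_and_pad_data data n_parts pad_char → Spec_split_and_pad_data data n_parts pad_char (split_and_pad_data data n_parts pad_char)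

-- ===== LEMMAS AND PROOFS =====

-- B's greedy ceil-division chop produces exactly A's closed-form slices.
lemma gfold_eq (s : List Char) (k m np : Int) (hk : 0 ≤ k) (hm : 0 ≤ m) (hmlt : m < np)
    (hn : np * k + m = (s.length : Int)) :
    ∀ (c : Nat) (r : Int) (acc : List (List Char)), r.toNat ≤ c → r ≤ np →
    ((PySem.List.pyRange r 0 (-1)).foldl
      (fun (st : List (List Char) × List Char) r =>
        let size : Int := -(PySem.Int.floordiv (-((st.2.length : Int))) r)
        (st.1 ++ [PySem.List.slice st.2 none (some size)], PySem.List.slice st.2 (some size) none))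
      (acc, s.drop ((np - r) * k + min (np - r) m).toNat)).1
    = acc ++ (PySem.List.pyRange (np - r) np).map
        (fun i => PySem.List.slice s (some (i * k + min i m)) (some ((i + 1) * k + min (i + 1) m))) := by
  intro c
  induction c with
  | zero =>
    intro r acc hc hr
    rw [PySem.List.pyRange_neg_one_eq_nil (by omega), PySem.List.pyRange_one_eq_nil (by omega)]
    simp
  | succ c ih =>
    intro r acc hc hr
    by_cases hpos : 0 < r
    · set i := np - r with hi
      have hr' : r = np - i := by omega
      have hi0 : 0 ≤ i := by omega
      have hilt : i < np := by omega
      have hexp : (i + 1) * k = i * k + k := by ring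
      have hoff0 : (0:Int) ≤ i * k + min i m := by
        have := mul_nonneg hi0 hk; omega
      have hoffle' : i * k + min i m ≤ (s.length : Int) := by
        have h1 : i * k ≤ np * k := mul_le_mul_of_nonneg_right (by omega) hk
        omega
      have hoffle : (i + 1) * k + min (i + 1) m ≤ (s.length : Int) := by
        have h1 : (i + 1) * k ≤ np * k := mul_le_mul_of_nonneg_right (by omega) hk
        omega
      have hrestlen : (((s.drop (i * k + min i m).toNat).length : Int)) = (s.length : Int) - (i * k + min i m) := by
        simp only [List.length_drop]
        omega
      set sz : Int := k + (if i < m then 1 else 0) with hszdef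
      have hsz0 : 0 ≤ sz := by rw [hszdef]; split_ifs <;> omega
      have hb : (i + 1) * k + min (i + 1) m = (i * k + min i m) + sz := by
        rw [hszdef]; split_ifs with h <;> omega
      -- size computed from the remaining string is sz
      have hsz : -(PySem.Int.floordiv (-(((s.drop (i * k + min i m).toNat).length : Int))) r) = sz := by
        rw [hrestlen, PySem.Int.neg_floordiv_neg_eq_iff_of_pos hpos]
        have P1 : k * r + i * k = np * k := by rw [hr']; ring
        rw [hszdef]
        split_ifs with h
        · have e1 : (k + 1 - 1) * r = k * r := by ring
          have e2 : (k + 1) * r = k * r + r := by ring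
          rw [e1, e2]
          omega
        · have e1 : (k + 0 - 1) * r = k * r - r := by ring
          have e2 : (k + 0) * r = k * r := by ring
          rw [e1, e2]
          omega
      -- one step of the loop
      rw [PySem.List.pyRange_neg_one_cons (show (0:Int) < r from hpos), List.foldl_cons]
      simp only [hsz]
      rw [PySem.List.slice_to _ hsz0, PySem.List.slice_from _ hsz0]
      -- the taken chunk is A's i-th slice
      have htake : (s.drop (i * k + min i m).toNat).take sz.toNat
          = PySem.List.slice s (some (i * k + min i m)) (some ((i + 1) * k + min (i + 1) m)) := by
        rw [PySem.List.slice_toNat s hoff0 (by omega : (0:Int) ≤ (i + 1) * k + min (i + 1) m)]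
        congr 1
        omega
      -- the remaining string advances to offset i+1
      have hdrop : (s.drop (i * k + min i m).toNat).drop sz.toNat
          = s.drop ((np - (r - 1)) * k + min (np - (r - 1)) m).toNat := by
        rw [List.drop_drop]
        congr 1
        have h1 : np - (r - 1) = i + 1 := by omega
        rw [h1]
        omega
      rw [htake, hdrop,
        ih (r - 1) (acc ++ [PySem.List.slice s (some (i * k + min i m)) (some ((i + 1) * k + min (i + 1) m))])
          (by omega) (by omega)]
      have h1 : np - (r - 1) = i + 1 := by omega
      rw [h1, PySem.List.pyRange_one_cons (show i < np from hilt), List.map_cons]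
      simp
    · rw [PySem.List.pyRange_neg_one_eq_nil (by omega), PySem.List.pyRange_one_eq_nil (by omega)]
      simp

theorem split_and_pad_data_spec_aux (data : String) (n_parts : Int) (pad_char : String)
    (hpre : Pre_split_and_pad_data data n_parts pad_char) :
    split_and_pad_data data n_parts pad_char = split_and_pad_data_alt data n_parts pad_char := by
  obtain ⟨hnp, hpc⟩ := hpre
  obtain ⟨ch, hch⟩ : ∃ ch, pad_char.toList = [ch] := by
    cases hl : pad_char.toList with
    | nil => rw [hl] at hpc; simp at hpc
    | cons x t =>
      cases t with
      | nil => exact ⟨x, rfl⟩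
      | cons y u => rw [hl] at hpc; simp at hpc
  have hnp0 : n_parts ≠ 0 := by omega
  set s : List Char := data.toList with hs
  have hlen : PySem.Str.len data = (s.length : Int) := by
    simp [PySem.Str.len_eq, hs]
  set k : Int := (PySem.Str.len data).fdiv n_parts with hk
  set m : Int := (PySem.Str.len data).fmod n_parts with hm
  have hkek : k = PySem.Str.len data / n_parts := by rw [hk, Int.fdiv_eq_ediv_of_nonneg _ (by omega)]
  have hmem : m = PySem.Str.len data % n_parts := by rw [hm, Int.fmod_eq_emod_of_nonneg _ (by omega)]
  have hm0 : 0 ≤ m := by rw [hmem]; exact Int.emod_nonneg _ hnp0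
  have hmlt : m < n_parts := by rw [hmem]; exact Int.emod_lt_of_pos _ (by omega)
  have hn0 : (0:Int) ≤ PySem.Str.len data := by rw [hlen]; positivity
  have hk0 : 0 ≤ k := by rw [hkek]; exact Int.ediv_nonneg hn0 (by omega)
  have hsum : n_parts * k + m = (s.length : Int) := by
    rw [hkek, hmem, ← hlen]; exact Int.mul_ediv_add_emod _ _
  unfold split_and_pad_data split_and_pad_data_alt
  simp only [PySem.Int.divmod?, if_neg hnp0, ← hk, ← hm]
  -- A's parts as a map over the range
  rw [PySem.List.foldl_append_singleton_eq_map
    (f := fun i => PySem.List.slice data.toList (some (i * k + min i m)) (some ((i + 1) * k + min (i + 1) m)))]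
  -- B's greedy loop produces the same parts
  have hB := gfold_eq s k m n_parts hk0 hm0 hmlt hsum n_parts.toNat n_parts [] (le_refl _) (le_refl _)
  rw [sub_self] at hB
  have hz : ((0:Int) * k + min 0 m).toNat = 0 := by
    have : min (0:Int) m = 0 := min_eq_left hm0
    rw [this]; simp
  rw [hz, List.drop_zero] at hB
  rw [← hs, hB, hch]
  simp only [List.nil_append]
  cases PySem.List.max?
      (((PySem.List.pyRange 0 n_parts).map
          (fun i => PySem.List.slice s (some (i * k + min i m)) (some ((i + 1) * k + min (i + 1) m)))).map
        (fun p => (p.length : Int))) (fun x => x) <;> simp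

-- ===== VERDICT (by name: the statement is the Claim_ definition above) =====
theorem split_and_pad_data_spec : Claim_equal_split_and_pad_data := by
  intro data n_parts pad_char _ hpre
  unfold Spec_split_and_pad_data
  exact split_and_pad_data_spec_aux data n_parts pad_char hpre
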